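-- pv_equiv track=rewrite | github.com/nive2530/CPS-NEU-AI-Assistant-Using-RAG-VB | dev/upload_to_vectordb.py | chunk_program_content
-- ===== SOURCE A (Python) =====
-- from typing import List, Dict, Any, Optional
--
-- def chunk_program_content(text: str, chunk_size: int = 5000) -> List[str]:
--     """
--     Split text content into three chunks:
--     1. Content before 'course plan'
--     2. Content between 'course plan' and '## Cost and Tuition'
--     3. Content after '## Cost and Tuition'
--
--     Args:
--         text (str): Input text to be split
--
--     Returns:
--         List[str]: List containing three chunks of text
--     """
--     # Split the text into lines while preserving empty lines
--     lines = text.splitlines(keepends=True)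
--
--     chunk1_lines = []
--     chunk2_lines = []
--     chunk3_lines = []
--
--     # Track which chunk we're currently building
--     current_chunk = 1
--
--     # Process each line
--     for line in lines:
--         # Check for first split condition (course plan)
--         if current_chunk == 1 and 'course plan' in line.lower():
--             current_chunk = 2
--             chunk2_lines.append(line)  # Include the splitting line in chunk 2
--             continue
--
--         # Check for second split condition (Cost and Tuition)
--         if current_chunk == 2 and line.strip().startswith("## Cost and Tuition"):
--             current_chunk = 3
--             chunk3_lines.append(line)  # Include the splitting line in chunk 3
--             continue
--
--         # Add line to appropriate chunk
--         if current_chunk == 1: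
--             chunk1_lines.append(line)
--         elif current_chunk == 2:
--             chunk2_lines.append(line)
--         else:
--             chunk3_lines.append(line)
--
--     # Join the lines back together for each chunk
--     chunk1 = ''.join(chunk1_lines)
--     chunk2 = ''.join(chunk2_lines)
--     chunk3 = ''.join(chunk3_lines)
--
--     # If no splits were found, handle appropriately
--     if not chunk2_lines and not chunk3_lines:
--         return [chunk1, '', '']
--     elif not chunk3_lines:
--         return [chunk1, chunk2, '']
--
--     return [chunk1, chunk2, chunk3]
-- ===== SOURCE B (Python) =====
-- def chunk_program_content(text: str, chunk_size: int = 5000):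
--     lines = text.splitlines(keepends=True)
--     i = next((k for k, ln in enumerate(lines) if 'course plan' in ln.lower()), None)
--     if i is None:
--         return [''.join(lines), '', '']
--     j0 = next((k for k, ln in enumerate(lines[i + 1:])
--                if ln.strip().startswith('## Cost and Tuition')), None)
--     if j0 is None:
--         return [''.join(lines[:i]), ''.join(lines[i:]), '']
--     j = i + 1 + j0
--     return [''.join(lines[:i]), ''.join(lines[i:j]), ''.join(lines[j:])]
-- ===== Notes on version B (the rewrite author's own statement) =====
-- stated objective: simpler
-- what changed: Replaces the per-line state-machine with three-accumulator bookkeeping by finding the two marker line-indices first and returning joined slices of the line list.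
import Mathlib
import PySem

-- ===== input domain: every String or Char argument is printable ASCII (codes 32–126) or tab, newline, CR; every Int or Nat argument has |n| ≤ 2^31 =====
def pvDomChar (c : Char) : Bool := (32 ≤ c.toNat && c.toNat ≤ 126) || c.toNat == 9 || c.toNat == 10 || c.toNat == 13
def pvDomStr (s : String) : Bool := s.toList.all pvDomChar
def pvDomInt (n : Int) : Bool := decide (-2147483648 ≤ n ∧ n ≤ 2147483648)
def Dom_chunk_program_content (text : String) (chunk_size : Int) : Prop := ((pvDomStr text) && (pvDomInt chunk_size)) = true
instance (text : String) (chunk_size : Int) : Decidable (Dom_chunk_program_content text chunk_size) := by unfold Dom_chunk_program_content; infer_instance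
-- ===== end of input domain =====

-- ===== PORT A =====
-- B changes: marker boundaries are found first and slices joined, instead of A's per-line
-- state-machine with three accumulators (objective: simpler).
-- shared helper: text.splitlines(keepends=True); exact on the ASCII domain, whose only
-- line breaks are '\n', '\r' and '\r\n' (Python also breaks on \x0b, \x0c, …, excluded by Dom_).
def pvSplitKeep : List Char → List Char → List (List Char)
  | '\r' :: '\n' :: rest, acc => (acc ++ ['\r', '\n']) :: pvSplitKeep rest []
  | '\r' :: rest, acc => (acc ++ ['\r']) :: pvSplitKeep rest []
  | '\n' :: rest, acc => (acc ++ ['\n']) :: pvSplitKeep rest []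
  | c :: rest, acc => pvSplitKeep rest (acc ++ [c])
  | [], acc => if acc.isEmpty then [] else [acc]

-- 'course plan' in line.lower()
def pvP1 (l : List Char) : Bool := PySem.Chars.isIn "course plan".toList (PySem.Chars.lower l)
-- line.strip().startswith("## Cost and Tuition")
def pvP2 (l : List Char) : Bool := PySem.Chars.startswith (PySem.Chars.strip l) "## Cost and Tuition".toList

-- the body of A's for-loop (state = chunk1_lines, chunk2_lines, chunk3_lines, current_chunk)
def pvAStep (st : List (List Char) × List (List Char) × List (List Char) × Nat) (line : List Char) :
    List (List Char) × List (List Char) × List (List Char) × Nat :=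
  let (c1, c2, c3, cur) := st
  if cur == 1 && pvP1 line then (c1, c2 ++ [line], c3, 2)
  else if cur == 2 && pvP2 line then (c1, c2, c3 ++ [line], 3)
  else if cur == 1 then (c1 ++ [line], c2, c3, cur)
  else if cur == 2 then (c1, c2 ++ [line], c3, cur)
  else (c1, c2, c3 ++ [line], cur)

def chunk_program_content (text : String) (chunk_size : Int) : List String :=
  let lines := pvSplitKeep text.toList []
  let st := lines.foldl pvAStep ([], [], [], 1)
  let chunk1 := String.mk (PySem.Chars.join [] st.1)
  let chunk2 := String.mk (PySem.Chars.join [] st.2.1)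
  let chunk3 := String.mk (PySem.Chars.join [] st.2.2.1)
  if st.2.1.isEmpty && st.2.2.1.isEmpty then [chunk1, "", ""]
  else if st.2.2.1.isEmpty then [chunk1, chunk2, ""]
  else [chunk1, chunk2, chunk3]

-- ===== PORT B =====
def chunk_program_content_alt (text : String) (chunk_size : Int) : List String :=
  let lines := pvSplitKeep text.toList []
  match lines.findIdx? pvP1 with
  | none => [String.mk (PySem.Chars.join [] lines), "", ""]
  | some i =>
    match (lines.drop (i + 1)).findIdx? pvP2 with
    | none => [String.mk (PySem.Chars.join [] (lines.take i)),
               String.mk (PySem.Chars.join [] (lines.drop i)), ""]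
    | some j0 =>
      let j := i + 1 + j0
      [String.mk (PySem.Chars.join [] (lines.take i)),
       String.mk (PySem.Chars.join [] ((lines.drop i).take (j - i))),
       String.mk (PySem.Chars.join [] (lines.drop j))]

-- ===== PRECONDITION & SPEC =====
def Spec_chunk_program_content (text : String) (chunk_size : Int) (out : List String) : Prop := out = chunk_program_content_alt text chunk_size
instance (text : String) (chunk_size : Int) (out : List String) : Decidable (Spec_chunk_program_content text chunk_size out) := by unfold Spec_chunk_program_content; infer_instance

-- ===== CLAIM (what is proved, stated in full; the proofs are below) =====
def Claim_equal_chunk_program_content : Prop := ∀ (text : String) (chunk_size : Int), Dom_chunk_program_content text chunk_size → Spec_chunk_program_content text chunk_size (chunk_program_content text chunk_size)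

-- ===== LEMMAS AND PROOFS =====

-- in state 3, every remaining line is appended to chunk3
lemma pvFold3 (ls c1 c2 c3 : List (List Char)) :
    List.foldl pvAStep (c1, c2, c3, 3) ls = (c1, c2, c3 ++ ls, 3) := by
  induction ls generalizing c3 with
  | nil => simp
  | cons l t ih =>
    rw [List.foldl_cons, show pvAStep (c1, c2, c3, 3) l = (c1, c2, c3 ++ [l], 3) from by
      simp [pvAStep], ih]
    simp

-- in state 2, chunk2 grows until the first p2 line, which starts chunk3
lemma pvFold2 (ls : List (List Char)) (c1 c2 c3 : List (List Char)) :
    List.foldl pvAStep (c1, c2, c3, 2) ls =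
      match ls.findIdx? pvP2 with
      | none => (c1, c2 ++ ls, c3, 2)
      | some j => (c1, c2 ++ ls.take j, c3 ++ ls.drop j, 3) := by
  induction ls generalizing c2 with
  | nil => simp
  | cons l t ih =>
    by_cases h : pvP2 l
    · rw [List.foldl_cons, show pvAStep (c1, c2, c3, 2) l = (c1, c2, c3 ++ [l], 3) from by
        simp [pvAStep, h], pvFold3]
      simp [List.findIdx?_cons, h]
    · rw [List.foldl_cons, show pvAStep (c1, c2, c3, 2) l = (c1, c2 ++ [l], c3, 2) from by
        simp [pvAStep, h], ih]
      rw [List.findIdx?_cons]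
      cases h2 : t.findIdx? pvP2 <;> simp [h, h2]

-- the whole loop: state 1 until the first p1 line, then state 2
lemma pvFold1 (ls : List (List Char)) (c1 : List (List Char)) :
    List.foldl pvAStep (c1, [], [], 1) ls =
      match ls.findIdx? pvP1 with
      | none => (c1 ++ ls, [], [], 1)
      | some i =>
        match (ls.drop (i + 1)).findIdx? pvP2 with
        | none => (c1 ++ ls.take i, ls.drop i, [], 2)
        | some j0 => (c1 ++ ls.take i, (ls.drop i).take (j0 + 1), (ls.drop (i + 1)).drop j0, 3) := by
  induction ls generalizing c1 with
  | nil => simp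
  | cons l t ih =>
    by_cases h : pvP1 l
    · rw [List.foldl_cons, show pvAStep (c1, [], [], 1) l = (c1, [l], [], 2) from by
        simp [pvAStep, h], pvFold2]
      rw [List.findIdx?_cons]
      cases h2 : t.findIdx? pvP2 <;> simp [h, h2]
    · rw [List.foldl_cons, show pvAStep (c1, [], [], 1) l = (c1 ++ [l], [], [], 1) from by
        simp [pvAStep, h], ih]
      rw [List.findIdx?_cons]
      cases h1 : t.findIdx? pvP1 with
      | none => simp [h, h1]
      | some i =>
        cases h2 : (t.drop (i + 1)).findIdx? pvP2 <;>
          simp [h, h1, h2, List.take_succ_cons, List.drop_succ_cons]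

-- ===== VERDICT (by name: the statement is the Claim_ definition above) =====
theorem chunk_program_content_spec : Claim_equal_chunk_program_content := by
  intro text chunk_size _
  unfold Spec_chunk_program_content
  simp only [chunk_program_content, chunk_program_content_alt]
  rw [pvFold1]
  cases h1 : (pvSplitKeep text.toList []).findIdx? pvP1 with
  | none => simp
  | some i =>
    have hi : i < (pvSplitKeep text.toList []).length :=
      (List.findIdx?_eq_some_iff_findIdx_eq.mp h1).1
    have hdrop : (pvSplitKeep text.toList []).drop i =
        (pvSplitKeep text.toList [])[i] :: (pvSplitKeep text.toList []).drop (i + 1) :=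
      List.drop_eq_getElem_cons hi
    cases h2 : ((pvSplitKeep text.toList []).drop (i + 1)).findIdx? pvP2 with
    | none =>
      have hne : ((pvSplitKeep text.toList []).drop i).isEmpty = false := by
        rw [hdrop]; rfl
      simp [h2, hne]
    | some j0 =>
      have hj : j0 < ((pvSplitKeep text.toList []).drop (i + 1)).length :=
        (List.findIdx?_eq_some_iff_findIdx_eq.mp h2).1
      have hlen : i + 1 + j0 < (pvSplitKeep text.toList []).length := by
        rw [List.length_drop] at hj; omega
      have hne3 : ((pvSplitKeep text.toList []).drop (i + 1 + j0)).isEmpty = false := by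
        rw [List.drop_eq_getElem_cons hlen]; rfl
      have harith : i + 1 + j0 - i = j0 + 1 := by omega
      simp [h2, harith, hne3]
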